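-- pv_equiv track=rewrite | github.com/fletchc/rookount | rookount.py | generateAttackList
-- ===== SOURCE A (Python) =====
-- def powerset(seq):
--     if len(seq) <= 1:
--         yield seq
--         yield []
--     else:
--         for item in powerset(seq[1:]):
--             yield [seq[0]]+item
--             yield item
--
-- def twoAttacking(tup1, tup2):
--     if tup1[0] != tup2[0]:
--         if tup1[1] == tup2[1] and tup1[2] == tup2[2]:
--             return True
--         else:
--             return False
--     elif tup1[1] == tup2[1]:
--         return True
--     elif tup1[2] == tup2[2]:
--         return True
--     return False
--
-- def generateAttackList(poslist):
--     # powset = []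
--     # for i in range(1,len(poslist)+1):
--         # for element in itertools.combinations(poslist,i):
--             # powset.append(list(element))
--     powset = list(powerset(poslist))
--
--     removelist = []
--     for setup in powset:
--         attacking = False
--         for i in range(len(setup)):
--             for j in range(i + 1, len(setup)):
--                 if twoAttacking(setup[i], setup[j]):
--                     removelist.append(setup)
--                     attacking = True
--                     break
--             if attacking:
--                 break
--     for setup in removelist:
--         powset.remove(setup)
--
--     return powset
-- ===== SOURCE B (Python) =====
-- def generateAttackList(poslist):
--     # Build the subsets iteratively (same order as the recursive generator),
--     # then keep the non-attacking ones by a single duplicate-key check per subset.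
--     if len(poslist) <= 1:
--         subsets = [list(poslist), []]
--     else:
--         subsets = [[poslist[-1]], []]
--         for elem in reversed(poslist[:-1]):
--             subsets = [s for item in subsets for s in ([elem] + item, item)]
--
--     def ok(setup):
--         if len(setup) < 2:
--             return True
--         br = [(p[0], p[1]) for p in setup]
--         bc = [(p[0], p[2]) for p in setup]
--         rc = [(p[1], p[2]) for p in setup]
--         return (len(set(br)) == len(br)
--                 and len(set(bc)) == len(bc)
--                 and len(set(rc)) == len(rc))
--
--     return [s for s in subsets if ok(s)]
-- ===== Notes on version B (the rewrite author's own statement) =====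
-- stated objective: simpler
-- what changed: B builds the powerset iteratively by folding over the reversed list instead of recursing, and replaces the nested pairwise twoAttacking scan plus removelist/.remove pass with one duplicate-key check per subset (a subset is non-attacking iff its (board,row), (board,col) and (row,col) key lists are duplicate-free), collecting survivors with a single filter.
-- outside the precondition, e.g. on generateAttackList([(1, 2), (3, 4)]): A returns [[(1, 2), (3, 4)], [(3, 4)], [(1, 2)], []], B raises IndexError
import Mathlib
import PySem

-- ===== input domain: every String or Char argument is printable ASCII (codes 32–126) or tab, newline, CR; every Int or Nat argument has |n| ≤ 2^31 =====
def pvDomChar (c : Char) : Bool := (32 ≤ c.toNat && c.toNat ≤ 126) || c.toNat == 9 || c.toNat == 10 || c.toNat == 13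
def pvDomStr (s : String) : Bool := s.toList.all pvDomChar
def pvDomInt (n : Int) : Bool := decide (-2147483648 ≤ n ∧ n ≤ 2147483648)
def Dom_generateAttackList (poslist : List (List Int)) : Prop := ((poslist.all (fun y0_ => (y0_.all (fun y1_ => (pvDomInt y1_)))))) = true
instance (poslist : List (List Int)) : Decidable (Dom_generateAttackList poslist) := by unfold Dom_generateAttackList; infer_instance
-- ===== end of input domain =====

-- B replaces the recursive powerset generator by an iterative fold (same order) and the
-- pairwise twoAttacking scan + removelist/.remove pass by one duplicate-key check per subset.

-- ===== PORT A =====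
def pyPowerset (seq : List (List Int)) : List (List (List Int)) :=
  if _h : seq.length ≤ 1 then [seq, []]
  else (pyPowerset (seq.drop 1)).flatMap (fun item => [seq.headI :: item, item])
termination_by seq.length
decreasing_by simp; omega

def twoAttacking (tup1 tup2 : List Int) : Bool :=
  if PySem.List.pyGet? tup1 0 != PySem.List.pyGet? tup2 0 then
    if PySem.List.pyGet? tup1 1 == PySem.List.pyGet? tup2 1
        && PySem.List.pyGet? tup1 2 == PySem.List.pyGet? tup2 2 then true
    else false
  else if PySem.List.pyGet? tup1 1 == PySem.List.pyGet? tup2 1 then true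
  else if PySem.List.pyGet? tup1 2 == PySem.List.pyGet? tup2 2 then true
  else false

-- the inner double loop with the `attacking` flag and breaks: the setup is appended iff some pair attacks
def setupAttacking (setup : List (List Int)) : Bool :=
  (PySem.List.pyRange 0 (PySem.List.len setup) 1).any (fun i =>
    (PySem.List.pyRange (i + 1) (PySem.List.len setup) 1).any (fun j =>
      twoAttacking (PySem.List.pyGetD setup i []) (PySem.List.pyGetD setup j [])))

def generateAttackList (poslist : List (List Int)) : List (List (List Int)) :=
  let powset := pyPowerset poslist
  let removelist := powset.foldl
    (fun rl setup => if setupAttacking setup then rl ++ [setup] else rl) []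
  removelist.foldl (fun ps setup => (PySem.List.remove? ps setup).getD ps) powset

-- ===== PORT B =====
def altSubsets (poslist : List (List Int)) : List (List (List Int)) :=
  if poslist.length ≤ 1 then [poslist, []]
  else (poslist.dropLast.reverse).foldl
    (fun subs elem => subs.flatMap (fun item => [elem :: item, item]))
    [[poslist.getLastD []], []]

def altOk (setup : List (List Int)) : Bool :=
  if setup.length < 2 then true
  else
    let br := setup.map (fun p => (PySem.List.pyGetD p 0 0, PySem.List.pyGetD p 1 0))
    let bc := setup.map (fun p => (PySem.List.pyGetD p 0 0, PySem.List.pyGetD p 2 0))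
    let rc := setup.map (fun p => (PySem.List.pyGetD p 1 0, PySem.List.pyGetD p 2 0))
    PySem.Set.len (PySem.Set.ofList br) == PySem.List.len br
      && PySem.Set.len (PySem.Set.ofList bc) == PySem.List.len bc
      && PySem.Set.len (PySem.Set.ofList rc) == PySem.List.len rc

def generateAttackList_alt (poslist : List (List Int)) : List (List (List Int)) :=
  (altSubsets poslist).filter altOk

-- ===== PRECONDITION & SPEC =====
-- Pre_ excludes inputs with ≥ 2 positions where some position has fewer than 3 coordinates:
-- there A's twoAttacking may raise IndexError (and where it happens to short-circuit before
-- the missing index, B's unconditional key construction raises instead).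
def Pre_generateAttackList (poslist : List (List Int)) : Prop :=
  poslist.length ≤ 1 ∨ ∀ p ∈ poslist, 3 ≤ p.length
instance (poslist : List (List Int)) : Decidable (Pre_generateAttackList poslist) := by
  unfold Pre_generateAttackList; infer_instance

def pvWitness_generateAttackList : List (List Int) := [[0, 0, 0], [0, 1, 1], [1, 2, 2]]

def Spec_generateAttackList (poslist : List (List Int)) (out : List (List (List Int))) : Prop := out = generateAttackList_alt poslist
instance (poslist : List (List Int)) (out : List (List (List Int))) : Decidable (Spec_generateAttackList poslist out) := by unfold Spec_generateAttackList; infer_instance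

-- ===== CLAIM (what is proved, stated in full; the proofs are below) =====
def Claim_equal_generateAttackList : Prop := ∀ (poslist : List (List Int)), Dom_generateAttackList poslist → Pre_generateAttackList poslist → Spec_generateAttackList poslist (generateAttackList poslist)

-- ===== LEMMAS AND PROOFS =====

-- len(set(xs)) == len(xs) is exactly the no-duplicates test
lemma length_ofList_eq_iff {α : Type} [BEq α] [LawfulBEq α] (xs : List α) :
    (PySem.Set.ofList xs).length = xs.length ↔ xs.Nodup := by
  induction xs using List.reverseRecOn with
  | nil => simp [PySem.Set.ofList]
  | append_singleton ys y ih =>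
    rw [PySem.Set.ofList_append_singleton]
    have hle := PySem.Set.length_ofList_le (xs := ys)
    by_cases hy : y ∈ ys
    · have hc : PySem.Set.contains (PySem.Set.ofList ys) y = true := by
        simp [PySem.Set.mem_ofList, hy]
      simp only [PySem.Set.add, hc, if_pos, List.length_append, List.nodup_append,
        List.length_singleton]
      exact iff_of_false (by omega) (fun h => by
        have := h.2.2; simp at this; exact this y hy rfl)
    · simp [PySem.Set.add, PySem.Set.mem_ofList, List.nodup_append, hy, ih]
      exact fun _ a ha h => hy (h ▸ ha)

-- the recursive powerset equals the iterative (foldr) form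
lemma pyPowerset_core : ∀ (seq : List (List Int)), seq ≠ [] →
    pyPowerset seq = seq.dropLast.foldr
      (fun elem subs => subs.flatMap (fun item => [elem :: item, item]))
      [[seq.getLastD []], []]
  | [], h => absurd rfl h
  | [x], _ => by simp [pyPowerset]
  | x :: y :: rest, _ => by
    rw [pyPowerset]
    have ih := pyPowerset_core (y :: rest) (by simp)
    rw [dif_neg (by simp)]
    simp only [List.drop_one, List.tail_cons, List.headI]
    rw [ih]
    simp [List.getLastD_eq_getLast?, List.dropLast_cons₂]

lemma subsets_eq (poslist : List (List Int)) : pyPowerset poslist = altSubsets poslist := by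
  unfold altSubsets
  by_cases h : poslist.length ≤ 1
  · rw [if_pos h, pyPowerset, dif_pos h]
  · rw [if_neg h, List.foldl_reverse,
      pyPowerset_core poslist (by intro he; subst he; simp at h)]

-- every member of a powerset element is a member of the base list
lemma mem_of_mem_pyPowerset : ∀ {seq s : List (List Int)}, s ∈ pyPowerset seq →
    ∀ {p : List Int}, p ∈ s → p ∈ seq := by
  intro seq
  induction seq using pyPowerset.induct with
  | case1 seq hle =>
    intro s hs p hp
    rw [pyPowerset, dif_pos hle] at hs
    simp at hs
    rcases hs with h | h <;> subst h <;> simp_all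
  | case2 seq hle ih =>
    intro s hs p hp
    rw [pyPowerset, dif_neg hle] at hs
    simp only [List.mem_flatMap] at hs
    obtain ⟨item, hitem, hmem⟩ := hs
    simp at hmem
    rcases hmem with h | h
    · subst h
      rcases List.mem_cons.mp hp with h | h
      · subst h
        cases seq with
        | nil => simp at hle
        | cons a t => simp [List.headI]
      · exact List.mem_of_mem_drop (ih hitem h)
    · subst h
      exact List.mem_of_mem_drop (ih hitem hp)

lemma length_le_of_mem_pyPowerset {seq s : List (List Int)} (h1 : seq.length ≤ 1)
    (hs : s ∈ pyPowerset seq) : s.length ≤ 1 := by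
  rw [pyPowerset, dif_pos h1] at hs
  simp at hs
  rcases hs with h | h <;> subst h <;> simp_all

-- the remove step commutes with an untouched head
lemma remove_step_cons {α : Type} [BEq α] [LawfulBEq α] :
    ∀ (R : List α) (ps : List α) (x : α), (∀ s ∈ R, s ≠ x) →
    R.foldl (fun ps s => (PySem.List.remove? ps s).getD ps) (x :: ps)
      = x :: R.foldl (fun ps s => (PySem.List.remove? ps s).getD ps) ps
  | [], _, _, _ => rfl
  | s :: R, ps, x, h => by
    have hne : x ≠ s := fun he => h s (by simp) he.symm
    simp only [List.foldl_cons]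
    rw [PySem.List.remove?_cons_of_ne ps hne]
    cases hr : PySem.List.remove? ps s with
    | none => simp; exact remove_step_cons R ps x (fun t ht => h t (by simp [ht]))
    | some t => simp; exact remove_step_cons R t x (fun t ht => h t (by simp [ht]))

-- the remove loop applied to the removelist is a filter
lemma remove_foldl_filter {α : Type} [BEq α] [LawfulBEq α] (q : α → Bool) :
    ∀ (P : List α),
    (P.filter q).foldl (fun ps s => (PySem.List.remove? ps s).getD ps) P
      = P.filter (fun s => !q s)
  | [] => rfl
  | x :: P => by
    by_cases hx : q x
    · rw [List.filter_cons_of_pos hx]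
      simp only [List.foldl_cons, PySem.List.remove?_cons_self, Option.getD_some]
      rw [remove_foldl_filter q P, List.filter_cons_of_neg (by simp [hx])]
    · rw [List.filter_cons_of_neg (by simp [hx]),
        remove_step_cons (P.filter q) P x
          (by intro s hs he; subst he; simp [List.mem_filter] at hs; simp [hs.2] at hx),
        remove_foldl_filter q P, List.filter_cons_of_pos (by simp [hx])]

-- characterisation of the pairwise scan
lemma setupAttacking_iff (setup : List (List Int)) :
    setupAttacking setup = true ↔ ∃ i j : Nat, i < j ∧ j < setup.length ∧
      twoAttacking (setup.getD i []) (setup.getD j []) = true := by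
  unfold setupAttacking
  simp only [List.any_eq_true, PySem.List.mem_pyRange_one, PySem.List.len_eq]
  constructor
  · rintro ⟨i, ⟨h0i, hil⟩, j, ⟨hij, hjl⟩, htw⟩
    have hi : i = ((i.toNat : Nat) : Int) := by omega
    have hj : j = ((j.toNat : Nat) : Int) := by omega
    rw [hi, hj, PySem.List.pyGetD_natCast, PySem.List.pyGetD_natCast] at htw
    exact ⟨i.toNat, j.toNat, by omega, by omega, htw⟩
  · rintro ⟨i, j, hij, hjl, htw⟩
    refine ⟨(i : Int), ⟨by omega, by omega⟩, (j : Int), ⟨by omega, by omega⟩, ?_⟩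
    rwa [PySem.List.pyGetD_natCast, PySem.List.pyGetD_natCast]

-- pointwise: two rooks attack iff they share one of the three keys
lemma twoAttacking_iff (a b : List Int) (ha : 3 ≤ a.length) (hb : 3 ≤ b.length) :
    twoAttacking a b = true ↔
      ((PySem.List.pyGetD a 0 0, PySem.List.pyGetD a 1 0) = (PySem.List.pyGetD b 0 0, PySem.List.pyGetD b 1 0)
      ∨ (PySem.List.pyGetD a 0 0, PySem.List.pyGetD a 2 0) = (PySem.List.pyGetD b 0 0, PySem.List.pyGetD b 2 0)
      ∨ (PySem.List.pyGetD a 1 0, PySem.List.pyGetD a 2 0) = (PySem.List.pyGetD b 1 0, PySem.List.pyGetD b 2 0)) := by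
  obtain ⟨a0, a1, a2, ta, rfl⟩ : ∃ x y z t, a = x :: y :: z :: t := by
    match a, ha with | x :: y :: z :: t, _ => exact ⟨x, y, z, t, rfl⟩
  obtain ⟨b0, b1, b2, tb, rfl⟩ : ∃ x y z t, b = x :: y :: z :: t := by
    match b, hb with | x :: y :: z :: t, _ => exact ⟨x, y, z, t, rfl⟩
  simp only [twoAttacking]
  simp [pysem]
  split_ifs <;> simp_all <;> tauto

-- the duplicate-key test of one key list
lemma nodup_check_iff (k : List Int → Int × Int) (l : List (List Int)) :
    (PySem.Set.len (PySem.Set.ofList (l.map k)) == PySem.List.len (l.map k)) = true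
      ↔ l.Pairwise (fun a b => k a ≠ k b) := by
  rw [beq_iff_eq, PySem.Set.len, PySem.List.len_eq, Nat.cast_inj, length_ofList_eq_iff]
  unfold List.Nodup
  rw [List.pairwise_map]

lemma altOk_eq (setup : List (List Int))
    (h : setup.length ≤ 1 ∨ ∀ p ∈ setup, 3 ≤ p.length) :
    altOk setup = !setupAttacking setup := by
  by_cases hlen : setup.length < 2
  · have hsa : setupAttacking setup = false := by
      cases hb : setupAttacking setup
      · rfl
      · obtain ⟨i, j, hij, hjl, _⟩ := (setupAttacking_iff setup).1 hb
        omega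
    rw [hsa, altOk, if_pos hlen]; rfl
  · have h3 : ∀ p ∈ setup, 3 ≤ p.length := by
      rcases h with h | h
      · omega
      · exact h
    have hmem : ∀ i : Nat, i < setup.length → 3 ≤ (setup.getD i []).length := by
      intro i hi
      rw [List.getD_eq_getElem _ _ hi]
      exact h3 _ (List.getElem_mem hi)
    have hOk : altOk setup = true ↔
        (setup.Pairwise (fun a b => (PySem.List.pyGetD a 0 0, PySem.List.pyGetD a 1 0) ≠ (PySem.List.pyGetD b 0 0, PySem.List.pyGetD b 1 0))
        ∧ setup.Pairwise (fun a b => (PySem.List.pyGetD a 0 0, PySem.List.pyGetD a 2 0) ≠ (PySem.List.pyGetD b 0 0, PySem.List.pyGetD b 2 0))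
        ∧ setup.Pairwise (fun a b => (PySem.List.pyGetD a 1 0, PySem.List.pyGetD a 2 0) ≠ (PySem.List.pyGetD b 1 0, PySem.List.pyGetD b 2 0))) := by
      unfold altOk
      rw [if_neg hlen]
      simp only [Bool.and_eq_true]
      rw [nodup_check_iff, nodup_check_iff, nodup_check_iff]
      tauto
    have hScan : setupAttacking setup = false ↔
        (setup.Pairwise (fun a b => (PySem.List.pyGetD a 0 0, PySem.List.pyGetD a 1 0) ≠ (PySem.List.pyGetD b 0 0, PySem.List.pyGetD b 1 0))
        ∧ setup.Pairwise (fun a b => (PySem.List.pyGetD a 0 0, PySem.List.pyGetD a 2 0) ≠ (PySem.List.pyGetD b 0 0, PySem.List.pyGetD b 2 0))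
        ∧ setup.Pairwise (fun a b => (PySem.List.pyGetD a 1 0, PySem.List.pyGetD a 2 0) ≠ (PySem.List.pyGetD b 1 0, PySem.List.pyGetD b 2 0))) := by
      rw [← Bool.not_eq_true, setupAttacking_iff]
      push_neg
      simp only [List.pairwise_iff_getElem]
      constructor
      · intro hno
        refine ⟨?_, ?_, ?_⟩ <;>
        · intro i j hi hj hij
          have hf := hno i j hij hj
          rw [ne_eq, twoAttacking_iff _ _ (hmem i (by omega)) (hmem j hj),
            List.getD_eq_getElem _ _ hi, List.getD_eq_getElem _ _ hj] at hf
          tauto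
      · rintro ⟨h1, h2, h3'⟩ i j hij hj
        rw [ne_eq, twoAttacking_iff _ _ (hmem i (by omega)) (hmem j hj),
          List.getD_eq_getElem _ _ (by omega), List.getD_eq_getElem _ _ hj]
        push_neg
        exact ⟨h1 i j (by omega) hj hij, h2 i j (by omega) hj hij,
          h3' i j (by omega) hj hij⟩
    cases hA : altOk setup <;> cases hB : setupAttacking setup <;> simp_all

-- ===== VERDICT (by name: the statement is the Claim_ definition above) =====
theorem generateAttackList_spec : Claim_equal_generateAttackList := by
  intro poslist _dom hpre
  unfold Spec_generateAttackList generateAttackList generateAttackList_alt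
  dsimp only
  have hrl : List.foldl (fun rl setup => if setupAttacking setup = true then rl ++ [setup] else rl)
      [] (pyPowerset poslist) = (pyPowerset poslist).filter setupAttacking := by
    simpa using PySem.List.foldl_append_if setupAttacking id (pyPowerset poslist) []
  rw [hrl, remove_foldl_filter setupAttacking (pyPowerset poslist), ← subsets_eq]
  apply List.filter_congr
  intro s hs
  rw [altOk_eq]
  rcases hpre with h1 | h1
  · exact Or.inl (length_le_of_mem_pyPowerset h1 hs)
  · exact Or.inr (fun p hp => h1 p (mem_of_mem_pyPowerset hs hp))
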